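-- pv_equiv track=rewrite | github.com/vit-001/Fget | site_models/simple/li_model.py | get_href
-- ===== SOURCE A (Python) =====
-- def get_href(txt):
--     if '&' in txt or '?' in txt:
--         txt = txt.replace('?', '&')
--         s = txt.split('&')
--         for str in s:
--             if str.startswith('url='):
--                 url = str[4:]
--                 return url
--     else:
--         return txt
-- ===== SOURCE B (Python) =====
-- def get_href(txt):
--     if '&' in txt or '?' in txt:
--         t = '&' + txt.replace('?', '&')
--         i = t.find('&url=')
--         if i == -1:
--             return None
--         rest = t[i + 5:]
--         j = rest.find('&')
--         return rest if j == -1 else rest[:j]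
--     else:
--         return txt
-- ===== Notes on version B (the rewrite author's own statement) =====
-- stated objective: alternative
-- what changed: Replaces the split-into-segments-plus-loop scan with a single substring search: prepend '&' and find the first occurrence of '&url=', then cut the value at the next '&'.
import Mathlib
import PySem

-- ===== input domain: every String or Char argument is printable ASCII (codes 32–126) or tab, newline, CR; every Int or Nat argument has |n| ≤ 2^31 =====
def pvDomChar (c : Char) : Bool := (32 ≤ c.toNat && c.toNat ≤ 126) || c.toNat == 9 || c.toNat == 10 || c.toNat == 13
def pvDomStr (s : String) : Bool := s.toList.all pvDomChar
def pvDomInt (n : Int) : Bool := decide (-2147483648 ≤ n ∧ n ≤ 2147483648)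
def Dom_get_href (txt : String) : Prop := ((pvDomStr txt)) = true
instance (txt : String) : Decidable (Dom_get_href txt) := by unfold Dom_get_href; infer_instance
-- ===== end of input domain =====

-- B replaces A's split-into-segments loop by a single substring search for '&url='; alternative structure, same behaviour.

-- ===== PORT A =====
-- the for-loop over the segments of txt.split('&')
def getHrefScan : List (List Char) → Option (List Char)
  | [] => none
  | seg :: rest =>
      if PySem.Chars.startswith seg ['u', 'r', 'l', '='] then
        some (PySem.Chars.slice seg (some 4) none)
      else getHrefScan rest

def get_href (txt : String) : Option String :=
  if PySem.Str.isIn "&" txt || PySem.Str.isIn "?" txt then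
    (getHrefScan (PySem.Chars.splitOn (PySem.Str.replace txt "?" "&").toList ['&'])).map String.ofList
  else some txt

-- ===== PORT B =====
def get_href_alt (txt : String) : Option String :=
  if PySem.Str.isIn "&" txt || PySem.Str.isIn "?" txt then
    let t : List Char := '&' :: (PySem.Str.replace txt "?" "&").toList
    let i := PySem.Chars.find t ['&', 'u', 'r', 'l', '=']
    if i = -1 then none
    else
      let rest := PySem.Chars.slice t (some (i + 5)) none
      let j := PySem.Chars.find rest ['&']
      if j = -1 then some (String.ofList rest)
      else some (String.ofList (PySem.Chars.slice rest none (some j)))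
  else some txt

-- ===== PRECONDITION & SPEC =====
def Spec_get_href (txt : String) (out : Option String) : Prop := out = get_href_alt txt
instance (txt : String) (out : Option String) : Decidable (Spec_get_href txt out) := by unfold Spec_get_href; infer_instance

-- ===== CLAIM (what is proved, stated in full; the proofs are below) =====
def Claim_equal_get_href : Prop := ∀ (txt : String), Dom_get_href txt → Spec_get_href txt (get_href txt)

-- ===== LEMMAS AND PROOFS =====

-- the key 'url=' literals
def pUrl : List Char := ['u', 'r', 'l', '=']
def pAmpUrl : List Char := ['&', 'u', 'r', 'l', '=']

-- first-occurrence index as a structurally recursive Option Nat, mirroring Chars.find.go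
def natFind? (sub : List Char) : List Char → Option Nat
  | [] => if sub.isEmpty then some 0 else none
  | c :: t => if sub.isPrefixOf (c :: t) then some 0 else (natFind? sub t).map (· + 1)

theorem findgo_eq (sub l : List Char) (k : Nat) :
    PySem.Chars.find.go sub l k =
      match natFind? sub l with | none => -1 | some j => ((k + j : Nat) : Int) := by
  induction l generalizing k with
  | nil => simp [PySem.Chars.find.go, natFind?]; split <;> simp
  | cons c t ih =>
      rw [PySem.Chars.find.go]
      by_cases h : sub.isPrefixOf (c :: t)
      · simp [natFind?, h]
      · simp only [natFind?, h, if_false, ih (k + 1)]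
        cases natFind? sub t <;> simp
        push_cast
        ring

theorem find_eq_natFind? (l sub : List Char) :
    PySem.Chars.find l sub = match natFind? sub l with | none => -1 | some j => (j : Int) := by
  rw [PySem.Chars.find, findgo_eq]; cases natFind? sub l <;> simp

-- reference splitter on '&', structural
def splitAmp : List Char → List (List Char)
  | [] => [[]]
  | c :: t =>
      if c = '&' then [] :: splitAmp t
      else
        match splitAmp t with
        | [] => [[c]]
        | s :: r => (c :: s) :: r

theorem splitAmp_ne_nil (l : List Char) : splitAmp l ≠ [] := by
  cases l with
  | nil => simp [splitAmp]
  | cons c t =>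
      simp only [splitAmp]
      split
      · simp
      · split <;> simp

def consHd (p : List Char) : List (List Char) → List (List Char)
  | [] => [p]
  | s :: r => (p ++ s) :: r

theorem splitOn_go_eq (l : List Char) (fuel : Nat) (cur : List Char) (acc : List (List Char))
    (h : l.length < fuel) :
    PySem.Chars.splitOn.go ['&'] fuel l cur acc = acc.reverse ++ consHd cur.reverse (splitAmp l) := by
  induction l generalizing fuel cur acc with
  | nil =>
      cases fuel with
      | zero => omega
      | succ f =>
          rw [PySem.Chars.splitOn.go]
          · simp [splitAmp, consHd]
          · omega
  | cons c t ih =>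
      cases fuel with
      | zero => omega
      | succ f =>
        rw [PySem.Chars.splitOn.go]
        by_cases hc : c = '&'
        · subst hc
          have hp : ['&'].isPrefixOf ('&' :: t) = true := by simp [List.isPrefixOf]
          rw [if_pos hp]
          have hdr : List.drop (List.length ['&']) ('&' :: t) = t := by simp
          rw [hdr, ih f [] (cur.reverse :: acc) (by simpa using h)]
          simp only [splitAmp, if_pos rfl, consHd, List.reverse_cons, List.reverse_nil,
            List.nil_append]
          cases hs : splitAmp t with
          | nil => exact absurd hs (splitAmp_ne_nil t)
          | cons s r => simp [consHd]
        · have hp : ¬ (['&'].isPrefixOf (c :: t) = true) := by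
            intro hx
            rw [List.isPrefixOf_iff_prefix] at hx
            exact hc (List.cons_prefix_cons.mp hx).1.symm
          rw [if_neg hp]
          rw [ih f (c :: cur) acc (by simpa using Nat.lt_of_succ_lt_succ h)]
          simp only [splitAmp, if_neg hc]
          cases hs : splitAmp t with
          | nil => exact absurd hs (splitAmp_ne_nil t)
          | cons s r => simp [consHd]

theorem splitOn_eq_splitAmp (cs : List Char) : PySem.Chars.splitOn cs ['&'] = splitAmp cs := by
  rw [PySem.Chars.splitOn, splitOn_go_eq cs (cs.length + 1) [] [] (by omega)]
  cases hs : splitAmp cs with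
  | nil => exact absurd hs (splitAmp_ne_nil cs)
  | cons s r => simp [consHd]

theorem splitAmp_no_amp (cs : List Char) (h : '&' ∉ cs) : splitAmp cs = [cs] := by
  induction cs with
  | nil => rfl
  | cons c t ih =>
      simp only [List.mem_cons, not_or] at h
      simp only [splitAmp, if_neg (fun hx : _ = '&' => h.1 hx.symm), ih h.2]

theorem splitAmp_append (pre suf : List Char) (h : '&' ∉ pre) :
    splitAmp (pre ++ '&' :: suf) = pre :: splitAmp suf := by
  induction pre with
  | nil => simp [splitAmp]
  | cons c p ih =>
      simp only [List.mem_cons, not_or] at h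
      simp only [List.cons_append, splitAmp, if_neg (fun hx : _ = '&' => h.1 hx.symm), ih h.2]

-- a pattern with no '&' matches 'pre ++ '&' :: suf' as a prefix iff it matches 'pre'
theorem prefix_amp_iff (p : List Char) (hp : '&' ∉ p) (pre suf : List Char) :
    p <+: pre ++ '&' :: suf ↔ p <+: pre := by
  induction p generalizing pre with
  | nil => simp
  | cons x q ih =>
      simp only [List.mem_cons, not_or] at hp
      cases pre with
      | nil =>
          simp only [List.nil_append]
          constructor
          · intro h
            exact absurd (List.cons_prefix_cons.mp h).1.symm hp.1
          · intro h
            exact absurd (List.prefix_nil.mp h) (by simp)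
      | cons y pre' =>
          simp only [List.cons_append, List.cons_prefix_cons]
          exact and_congr_right fun _ => ih hp.2 pre'

-- reference result function
def refF (cs : List Char) : Option (List Char) :=
  if pUrl.isPrefixOf cs then some ((cs.drop 4).takeWhile (· ≠ '&'))
  else
    match h : cs.dropWhile (· ≠ '&') with
    | [] => none
    | _ :: suf => refF suf
termination_by cs.length
decreasing_by
  have h1 := List.length_dropWhile_le (· ≠ '&') cs
  rw [h] at h1
  simp at h1
  omega

-- the first '&'-decomposition of a list containing '&'
theorem amp_decomp (cs : List Char) (hm : '&' ∈ cs) :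
    ∃ suf, cs = cs.takeWhile (· ≠ '&') ++ '&' :: suf ∧ '&' ∉ cs.takeWhile (· ≠ '&') ∧
      cs.dropWhile (· ≠ '&') = '&' :: suf := by
  have hd : cs.dropWhile (· ≠ '&') ≠ [] := by
    simp only [ne_eq, List.dropWhile_eq_nil_iff]
    push_neg
    exact ⟨'&', hm, by simp⟩
  obtain ⟨d, suf, hds⟩ := List.exists_cons_of_ne_nil hd
  have h2 := List.head_dropWhile_not (· ≠ '&') hd
  have h4 : (cs.dropWhile (· ≠ '&')).head? = some d := by rw [hds]; rfl
  rw [List.head?_eq_head hd] at h4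
  have hdamp : d = '&' := by
    have h5 : (cs.dropWhile (· ≠ '&')).head hd = d := by injection h4
    rw [h5] at h2
    simpa using h2
  subst hdamp
  refine ⟨suf, ?_, ?_, hds⟩
  · conv_lhs => rw [← List.takeWhile_append_dropWhile (p := (· ≠ '&')) (l := cs)]
    rw [hds]
  · intro hx
    have := List.mem_takeWhile_imp hx
    simp at this

-- === A-side: the split-and-scan equals refF ===

theorem takeWhile_amp (a b : List Char) (h : '&' ∉ a) :
    (a ++ '&' :: b).takeWhile (· ≠ '&') = a := by
  induction a with
  | nil => simp [List.takeWhile]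
  | cons c t ih =>
      simp only [List.mem_cons, not_or] at h
      have hc : ¬ c = '&' := fun hx => h.1 hx.symm
      have hd : (decide (c ≠ '&')) = true := by simp [hc]
      rw [List.cons_append, List.takeWhile_cons, if_pos hd]
      exact congrArg (c :: ·) (ih h.2)

theorem scan_eq_refF (cs : List Char) : getHrefScan (splitAmp cs) = refF cs := by
  by_cases hm : '&' ∈ cs
  · obtain ⟨suf, hcs, hnp, hds⟩ := amp_decomp cs hm
    set pre := cs.takeWhile (· ≠ '&') with hpre
    rw [refF]
    have hiff := prefix_amp_iff pUrl (by simp [pUrl]) pre suf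
    conv_lhs => rw [hcs]
    rw [splitAmp_append pre suf hnp]
    by_cases hu : pUrl <+: pre
    · have hcsu : pUrl.isPrefixOf cs = true := by
        rw [List.isPrefixOf_iff_prefix, hcs]
        exact hiff.mpr hu
      rw [if_pos hcsu]
      have hlen : 4 ≤ pre.length := by
        have := hu.length_le
        simpa [pUrl] using this
      rw [getHrefScan,
        if_pos (by rw [PySem.Chars.startswith, ← pUrl, List.isPrefixOf_iff_prefix]; exact hu)]
      rw [hcs, List.drop_append_of_le_length hlen]
      rw [takeWhile_amp _ _ (fun hx => hnp (List.mem_of_mem_drop hx))]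
      congr 1
      rw [PySem.Chars.slice_eq_listSlice, PySem.List.slice_from _ (by norm_num)]
      rfl
    · have hcsu : ¬ (pUrl.isPrefixOf cs = true) := by
        rw [List.isPrefixOf_iff_prefix, hcs]
        exact fun hx => hu (hiff.mp hx)
      rw [if_neg hcsu]
      rw [getHrefScan,
        if_neg (by rw [PySem.Chars.startswith, ← pUrl, List.isPrefixOf_iff_prefix]; exact hu)]
      rw [hds]
      exact scan_eq_refF suf
  · rw [splitAmp_no_amp cs hm, refF]
    have hdrop : cs.dropWhile (· ≠ '&') = [] := by
      rw [List.dropWhile_eq_nil_iff]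
      intro c hc
      simp only [ne_eq, decide_eq_true_eq]
      rintro rfl
      exact hm hc
    by_cases hu : pUrl.isPrefixOf cs
    · rw [if_pos hu, getHrefScan, if_pos (by rw [PySem.Chars.startswith, ← pUrl]; exact hu)]
      congr 1
      rw [PySem.Chars.slice_eq_listSlice, PySem.List.slice_from _ (by norm_num)]
      rw [List.takeWhile_eq_self_iff.mpr]
      · rfl
      · intro c hc
        simp only [ne_eq, decide_eq_true_eq]
        rintro rfl
        exact hm (List.mem_of_mem_drop hc)
    · rw [if_neg hu, getHrefScan, if_neg (by rw [PySem.Chars.startswith, ← pUrl]; exact hu), hdrop]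
      rfl
termination_by cs.length
decreasing_by
  have h1 := List.length_dropWhile_le (· ≠ '&') cs
  rw [hds] at h1
  simp at h1
  omega

-- === B-side: the find-based computation equals refF ===

-- B's branch body at the List Char level
def bCore (cs : List Char) : Option (List Char) :=
  let t : List Char := '&' :: cs
  let i := PySem.Chars.find t pAmpUrl
  if i = -1 then none
  else
    let rest := PySem.Chars.slice t (some (i + 5)) none
    let j := PySem.Chars.find rest ['&']
    if j = -1 then some rest
    else some (PySem.Chars.slice rest none (some j))

theorem natFind?_amp (l : List Char) :
    natFind? ['&'] l = if '&' ∈ l then some (l.takeWhile (· ≠ '&')).length else none := by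
  induction l with
  | nil => simp [natFind?]
  | cons c t ih =>
      by_cases hc : c = '&'
      · subst hc
        simp [natFind?, List.isPrefixOf, List.takeWhile_cons]
      · have hcc : ¬ '&' = c := fun hx => hc hx.symm
        have hnp : ¬ (['&'].isPrefixOf (c :: t) = true) := by
          intro hx
          rw [List.isPrefixOf_iff_prefix] at hx
          exact hc (List.cons_prefix_cons.mp hx).1.symm
        rw [natFind?, if_neg hnp, ih]
        by_cases hm : '&' ∈ t
        · simp [hm, hcc, List.takeWhile_cons, hc]
        · simp [hm, hcc]

theorem natFind?_no_amp (l : List Char) (h : '&' ∉ l) : natFind? pAmpUrl l = none := by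
  induction l with
  | nil => simp [natFind?, pAmpUrl]
  | cons c t ih =>
      simp only [List.mem_cons, not_or] at h
      have hnp : ¬ (pAmpUrl.isPrefixOf (c :: t) = true) := by
        intro hx
        rw [List.isPrefixOf_iff_prefix] at hx
        simp only [pAmpUrl] at hx
        exact h.1 (List.cons_prefix_cons.mp hx).1
      rw [natFind?, if_neg hnp, ih h.2]
      rfl

theorem natFind?_append_shift (pre rest : List Char) (h : '&' ∉ pre) :
    natFind? pAmpUrl (pre ++ rest) = (natFind? pAmpUrl rest).map (· + pre.length) := by
  induction pre with
  | nil => cases h : natFind? pAmpUrl rest <;> simp [h]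
  | cons c p ih =>
      simp only [List.mem_cons, not_or] at h
      have hnp : ¬ (pAmpUrl.isPrefixOf (c :: (p ++ rest)) = true) := by
        intro hx
        rw [List.isPrefixOf_iff_prefix] at hx
        simp only [pAmpUrl] at hx
        exact h.1 (List.cons_prefix_cons.mp hx).1
      rw [List.cons_append, natFind?, if_neg hnp, ih h.2]
      cases natFind? pAmpUrl rest <;> simp
      omega

theorem bCore_eq_refF (cs : List Char) : bCore cs = refF cs := by
  rw [bCore, refF]
  dsimp only
  by_cases hu : pUrl.isPrefixOf cs
  · -- match at position 0
    have hp : pAmpUrl.isPrefixOf ('&' :: cs) = true := by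
      rw [List.isPrefixOf_iff_prefix]
      show ('&' :: pUrl) <+: ('&' :: cs)
      rw [List.cons_prefix_cons]
      exact ⟨rfl, List.isPrefixOf_iff_prefix.mp hu⟩
    have h0 : natFind? pAmpUrl ('&' :: cs) = some 0 := by
      rw [natFind?, if_pos hp]
    rw [if_pos hu]
    rw [show PySem.Chars.find ('&' :: cs) pAmpUrl = ((0 : Nat) : Int) from by
      rw [find_eq_natFind?, h0]]
    rw [if_neg (by norm_num)]
    have hrest : PySem.Chars.slice ('&' :: cs) (some (((0 : Nat) : Int) + 5)) none = cs.drop 4 := by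
      rw [PySem.Chars.slice_eq_listSlice]
      rw [show (((0 : Nat) : Int) + 5) = (5 : Int) by norm_num]
      rw [PySem.List.slice_from _ (by norm_num)]
      rfl
    rw [hrest]
    rw [find_eq_natFind? (cs.drop 4) ['&'], natFind?_amp]
    by_cases hm : '&' ∈ cs.drop 4
    · rw [if_pos hm]
      dsimp only
      rw [if_neg (show ¬((((cs.drop 4).takeWhile (· ≠ '&')).length : Int) = -1) by omega)]
      rw [PySem.Chars.slice_eq_listSlice, PySem.List.slice_to _ (by positivity), Int.toNat_natCast]
      exact congrArg some (List.prefix_iff_eq_take.mp (List.takeWhile_prefix _)).symm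
    · rw [if_neg hm, if_pos rfl]
      rw [List.takeWhile_eq_self_iff.mpr]
      intro c hc
      simp only [ne_eq, decide_eq_true_eq]
      rintro rfl
      exact hm hc
  · rw [if_neg hu]
    by_cases hm : '&' ∈ cs
    · obtain ⟨suf, hcs, hnp, hds⟩ := amp_decomp cs hm
      set pre := cs.takeWhile (· ≠ '&') with hpre
      have hshift : natFind? pAmpUrl ('&' :: cs) =
          (natFind? pAmpUrl ('&' :: suf)).map (· + (pre.length + 1)) := by
        have hnot : ¬ (pAmpUrl.isPrefixOf ('&' :: cs) = true) := by
          intro hx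
          rw [List.isPrefixOf_iff_prefix] at hx
          have hx2 : pUrl <+: cs := by
            have := (List.cons_prefix_cons.mp hx).2
            simpa [pAmpUrl, pUrl] using this
          apply hu
          rw [List.isPrefixOf_iff_prefix]
          exact hx2
        rw [natFind?, if_neg hnot]
        conv_lhs => rw [hcs]
        rw [natFind?_append_shift pre ('&' :: suf) hnp]
        cases natFind? pAmpUrl ('&' :: suf) <;> simp
        omega
      rw [hds]
      dsimp only
      rw [← bCore_eq_refF suf]
      rw [bCore]
      dsimp only
      cases hn : natFind? pAmpUrl ('&' :: suf) with
      | none =>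
          rw [show PySem.Chars.find ('&' :: cs) pAmpUrl = -1 from by
            rw [find_eq_natFind?, hshift, hn]; rfl]
          rw [show PySem.Chars.find ('&' :: suf) pAmpUrl = -1 from by
            rw [find_eq_natFind?, hn]]
          rfl
      | some j =>
          rw [show PySem.Chars.find ('&' :: cs) pAmpUrl = ((j + (pre.length + 1) : Nat) : Int) from by
            rw [find_eq_natFind?, hshift, hn]; rfl]
          rw [show PySem.Chars.find ('&' :: suf) pAmpUrl = ((j : Nat) : Int) from by
            rw [find_eq_natFind?, hn]]
          rw [if_neg (show ¬(((j + (pre.length + 1) : Nat) : Int) = -1) by omega)]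
          rw [if_neg (show ¬(((j : Nat) : Int) = -1) by omega)]
          have hsl : PySem.Chars.slice ('&' :: cs) (some (((j + (pre.length + 1) : Nat) : Int) + 5)) none
              = PySem.Chars.slice ('&' :: suf) (some (((j : Nat) : Int) + 5)) none := by
            rw [PySem.Chars.slice_eq_listSlice, PySem.Chars.slice_eq_listSlice]
            rw [show (((j + (pre.length + 1) : Nat) : Int) + 5) = (((j + pre.length + 6 : Nat) : Int)) by push_cast; ring]
            rw [show (((j : Nat) : Int) + 5) = (((j + 5 : Nat) : Int)) by push_cast; ring]
            rw [PySem.List.slice_from _ (by positivity), PySem.List.slice_from _ (by positivity)]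
            rw [Int.toNat_natCast, Int.toNat_natCast]
            have h1 : ('&' :: cs) = ('&' :: pre) ++ '&' :: suf := by rw [hcs]; rfl
            rw [h1]
            rw [show (j + pre.length + 6) = ('&' :: pre).length + (j + 5) by simp; omega]
            rw [List.drop_length_add_append]
          rw [hsl]
    · have hnone : natFind? pAmpUrl ('&' :: cs) = none := by
        have hnot : ¬ (pAmpUrl.isPrefixOf ('&' :: cs) = true) := by
          intro hx
          rw [List.isPrefixOf_iff_prefix] at hx
          apply hu
          rw [List.isPrefixOf_iff_prefix]
          have := (List.cons_prefix_cons.mp hx).2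
          simpa [pAmpUrl, pUrl] using this
        rw [natFind?, if_neg hnot, natFind?_no_amp cs hm]
        rfl
      rw [show PySem.Chars.find ('&' :: cs) pAmpUrl = -1 from by
        rw [find_eq_natFind?, hnone]]
      rw [if_pos rfl]
      have hdrop : cs.dropWhile (· ≠ '&') = [] := by
        rw [List.dropWhile_eq_nil_iff]
        intro c hc
        simp only [ne_eq, decide_eq_true_eq]
        rintro rfl
        exact hm hc
      rw [hdrop]
termination_by cs.length
decreasing_by
  have h1 := List.length_dropWhile_le (· ≠ '&') cs
  rw [hds] at h1
  simp at h1
  omega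

-- ===== VERDICT (by name: the statement is the Claim_ definition above) =====
theorem get_href_spec : Claim_equal_get_href := by
  intro txt _
  unfold Spec_get_href get_href get_href_alt
  by_cases hg : (PySem.Str.isIn "&" txt || PySem.Str.isIn "?" txt) = true
  · rw [if_pos hg, if_pos hg]
    set cs := (PySem.Str.replace txt "?" "&").toList with hcs
    have hA : getHrefScan (PySem.Chars.splitOn cs ['&']) = refF cs := by
      rw [splitOn_eq_splitAmp, scan_eq_refF]
    rw [hA, ← bCore_eq_refF]
    rw [bCore]
    dsimp only
    simp only [pAmpUrl]
    split_ifs <;> simp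
  · rw [if_neg hg, if_neg hg]
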